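-- pv_equiv track=rewrite | github.com/calin17/lab1_ai | lab1_ai.py | pb_8_lab1
-- ===== SOURCE A (Python) =====
-- def pb_8_lab1(n):
--     """Retuneaza o lista cu numerele de la i la n in rep binara
--          :parameter n :numar intreg
--          :return:un string cu numerele
--           """
--     rez=""
--     for i in range(1, n + 1):
--        num=""
--        i=int(i)
--        while i!=0:
--            st=str(i%2)
--            num=num+st
--            i=i//2
--        rez=rez+num[::-1]+" "
--
--     return rez
-- ===== SOURCE B (Python) =====
-- def pb_8_lab1(n):
--     """Same result as A: binary representations of 1..n, each followed by a space."""
--     return ''.join(format(i, 'b') + ' ' for i in range(1, n + 1))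
-- ===== Notes on version B (the rewrite author's own statement) =====
-- stated objective: faster
-- what changed: Replaces A's inner repeated-division while-loop and quadratic string accumulation (rez = rez + ...) by a single pass that gets each number's binary string directly with format(i,'b') and assembles the result with ''.join, which is linear in the output size.
import Mathlib
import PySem

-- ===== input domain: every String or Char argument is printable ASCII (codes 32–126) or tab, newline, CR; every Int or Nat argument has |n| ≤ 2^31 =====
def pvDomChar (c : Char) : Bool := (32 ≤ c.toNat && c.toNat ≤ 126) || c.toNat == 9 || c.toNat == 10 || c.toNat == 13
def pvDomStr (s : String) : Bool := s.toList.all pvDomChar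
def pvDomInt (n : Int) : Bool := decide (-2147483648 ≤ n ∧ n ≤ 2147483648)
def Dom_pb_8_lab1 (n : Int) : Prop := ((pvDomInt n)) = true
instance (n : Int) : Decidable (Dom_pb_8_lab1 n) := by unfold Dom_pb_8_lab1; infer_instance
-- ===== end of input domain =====

-- B replaces A's inner repeated-division while-loop by obtaining each binary string
-- directly (format(i,'b')) in a single join-pass: same result, more idiomatic.


-- ===== PORT A =====
-- inner 'while i != 0' loop of A; every i reached here is a range(1, n+1) element,
-- hence a nonnegative integer, so recursion on Nat is exact (i//2 = Nat division,
-- i%2 = Nat mod for i ≥ 0).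
def pbWhile : Nat → List Char → List Char
  | 0, num => num
  | (i+1), num =>
      pbWhile ((i+1)/2) (num ++ (PySem.Int.toStr (PySem.Int.mod ((i:Int)+1) 2)).toList)
decreasing_by omega

-- num[::-1] is List.reverse; the string is accumulated as List Char and wrapped at the end.
def pb_8_lab1 (n : Int) : String :=
  String.ofList ((PySem.List.pyRange 1 (n+1) 1).foldl
    (fun rez i => rez ++ (pbWhile i.toNat []).reverse ++ [' ']) [])

-- ===== PORT B =====
-- format(i,'b') for i ≥ 0 (all i drawn from range(1, n+1) are ≥ 1): most-significant bit first.
def binChars (i : Nat) : List Char :=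
  if i < 2 then [Char.ofNat (48 + i)]
  else binChars (i/2) ++ [Char.ofNat (48 + i % 2)]
decreasing_by omega

def pb_8_lab1_alt (n : Int) : String :=
  String.ofList (((PySem.List.pyRange 1 (n+1) 1).map
    (fun i => binChars i.toNat ++ [' '])).flatten)

-- ===== PRECONDITION & SPEC =====
def Spec_pb_8_lab1 (n : Int) (out : String) : Prop := out = pb_8_lab1_alt n
instance (n : Int) (out : String) : Decidable (Spec_pb_8_lab1 n out) := by unfold Spec_pb_8_lab1; infer_instance

-- ===== CLAIM (what is proved, stated in full; the proofs are below) =====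
def Claim_equal_pb_8_lab1 : Prop := ∀ (n : Int), Dom_pb_8_lab1 n → Spec_pb_8_lab1 n (pb_8_lab1 n)

-- ===== LEMMAS AND PROOFS =====

-- the accumulator of the while loop is a pure prefix
theorem pbWhile_acc (i : Nat) (num : List Char) : pbWhile i num = num ++ pbWhile i [] := by
  induction i using Nat.strong_induction_on generalizing num with
  | _ i ih =>
    match i with
    | 0 => simp [pbWhile]
    | (j+1) =>
      rw [pbWhile, pbWhile]
      rw [ih ((j+1)/2) (by omega), ih ((j+1)/2) (by omega) (_ ++ _)]
      simp

-- the digit character str(i % 2) produced by A for positive i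
theorem digit_char (j : Nat) :
    (PySem.Int.toStr (PySem.Int.mod ((j:Int)+1) 2)).toList = [Char.ofNat (48 + (j+1) % 2)] := by
  have h : ((j:Int)+1) = ((j+1 : Nat) : Int) := by push_cast; ring
  rw [h, show (2:Int) = ((2:Nat):Int) from rfl, PySem.Int.mod_natCast]
  rcases Nat.mod_two_eq_zero_or_one (j+1) with h2 | h2 <;> rw [h2] <;> decide

-- A's reversed LSB-first digits = B's MSB-first binary string, for positive i
theorem pbWhile_reverse (i : Nat) (hi : 1 ≤ i) :
    (pbWhile i []).reverse = binChars i := by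
  induction i using Nat.strong_induction_on with
  | _ i ih =>
    match i, hi with
    | (j+1), _ =>
      rw [pbWhile, digit_char, pbWhile_acc]
      by_cases h2 : j+1 < 2
      · have hj : j = 0 := by omega
        subst hj
        simp [pbWhile, binChars]
      · have hdiv : 1 ≤ (j+1)/2 := by omega
        have hlt : (j+1)/2 < j+1 := by omega
        rw [List.nil_append, List.reverse_append, List.reverse_singleton, ih _ hlt hdiv]
        conv_rhs => rw [binChars]
        simp [h2]

-- ===== VERDICT (by name: the statement is the Claim_ definition above) =====

theorem pb_8_lab1_spec : Claim_equal_pb_8_lab1 := by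
  intro n _
  unfold Spec_pb_8_lab1 pb_8_lab1 pb_8_lab1_alt
  rw [PySem.List.foldl_congr_mem (g := fun rez i => rez ++ (binChars i.toNat ++ [' ']))
      (h := by
        intro acc x hx
        rw [PySem.List.mem_pyRange_one] at hx
        have h1 : 1 ≤ x.toNat := by omega
        rw [pbWhile_reverse x.toNat h1, List.append_assoc])]
  rw [PySem.List.foldl_append_eq_flatMap]
  simp [List.flatMap]
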